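-- pv_equiv track=rewrite | github.com/neito1111/test-bot | bot/handlers/wictory.py | _split_link_comment
-- ===== SOURCE A (Python) =====
-- def _split_link_comment(raw: str | None) -> tuple[str | None, str | None]:
--     txt = str(raw or "").strip()
--     if not txt:
--         return None, None
--     lines = [x.strip() for x in txt.splitlines() if x.strip()]
--     links = [x for x in lines if x.startswith("http://") or x.startswith("https://")]
--     comments = [x for x in lines if x not in links]
--     link = "\n".join(links).strip() or None
--     comment = "\n".join(comments).strip() or None
--     return link, comment
-- ===== SOURCE B (Python) =====
-- def _split_link_comment(raw):
--     txt = str(raw or "").strip()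
--     if not txt:
--         return None, None
--     link = ""
--     comment = ""
--     for x in txt.splitlines():
--         x = x.strip()
--         if not x:
--             continue
--         if x.startswith("http://") or x.startswith("https://"):
--             link = x if not link else link + "\n" + x
--         else:
--             comment = x if not comment else comment + "\n" + x
--     return link or None, comment or None
-- ===== Notes on version B (the rewrite author's own statement) =====
-- stated objective: alternative
-- what changed: B builds the two result strings directly in a single pass with string accumulators (appending '\n' + line as it goes), eliminating A's three list passes, the quadratic `x not in links` membership scan, and the final join+strip stage.
import Mathlib
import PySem

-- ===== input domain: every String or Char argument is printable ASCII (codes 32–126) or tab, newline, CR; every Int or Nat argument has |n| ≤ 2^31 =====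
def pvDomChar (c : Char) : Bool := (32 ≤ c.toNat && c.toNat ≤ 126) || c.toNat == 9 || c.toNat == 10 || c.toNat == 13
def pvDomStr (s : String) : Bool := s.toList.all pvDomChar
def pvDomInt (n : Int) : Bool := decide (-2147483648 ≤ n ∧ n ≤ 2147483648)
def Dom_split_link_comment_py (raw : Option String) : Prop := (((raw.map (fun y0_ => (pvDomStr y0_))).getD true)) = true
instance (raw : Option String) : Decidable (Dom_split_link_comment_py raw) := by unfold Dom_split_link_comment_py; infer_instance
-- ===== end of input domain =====

-- B builds the two result strings directly in one pass over the lines, appending "\n"+line to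
-- the matching accumulator; A's three list passes (with an `x not in links` scan) and the final
-- join+strip stage disappear (objective: alternative).

-- ===== PORT A =====
def pvIsLink (x : String) : Bool :=
  PySem.Str.startswith x "http://" || PySem.Str.startswith x "https://"

def split_link_comment_py (raw : Option String) : Option String × Option String :=
  let txt := PySem.Str.strip (raw.getD "")
  if txt = "" then (none, none)
  else
    let lines := ((PySem.Str.splitlines txt).filter (fun x => PySem.Str.strip x != "")).map PySem.Str.strip
    let links := lines.filter pvIsLink
    let comments := lines.filter (fun x => !(links.contains x))
    let link := PySem.Str.strip (PySem.Str.join "\n" links)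
    let comment := PySem.Str.strip (PySem.Str.join "\n" comments)
    ((if link = "" then none else some link), (if comment = "" then none else some comment))

-- ===== PORT B =====
-- B's loop works on the line's characters (PySem.Chars = the exact string semantics on List Char).
def pvIsLinkC (x : List Char) : Bool :=
  PySem.Chars.startswith x "http://".toList || PySem.Chars.startswith x "https://".toList

-- one iteration of B's loop: strip the line, skip blanks, extend the matching accumulator string
def pvStepB (acc : List Char × List Char) (x : List Char) : List Char × List Char :=
  let line := PySem.Chars.strip x
  if line = [] then acc
  else if pvIsLinkC line then
    ((if acc.1 = [] then line else acc.1 ++ '\n' :: line), acc.2)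
  else
    (acc.1, (if acc.2 = [] then line else acc.2 ++ '\n' :: line))

def split_link_comment_py_alt (raw : Option String) : Option String × Option String :=
  let txt := PySem.Str.strip (raw.getD "")
  if txt = "" then (none, none)
  else
    let p := (PySem.Chars.splitlines txt.toList).foldl pvStepB ([], [])
    ((if p.1 = [] then none else some (String.ofList p.1)),
     (if p.2 = [] then none else some (String.ofList p.2)))

-- ===== PRECONDITION & SPEC =====
def Spec_split_link_comment_py (raw : Option String) (out : Option String × Option String) : Prop := out = split_link_comment_py_alt raw
instance (raw : Option String) (out : Option String × Option String) : Decidable (Spec_split_link_comment_py raw out) := by unfold Spec_split_link_comment_py; infer_instance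

-- ===== CLAIM (what is proved, stated in full; the proofs are below) =====
def Claim_equal_split_link_comment_py : Prop := ∀ (raw : Option String), Dom_split_link_comment_py raw → Spec_split_link_comment_py raw (split_link_comment_py raw)

-- ===== LEMMAS AND PROOFS =====

-- "\n".join over char lists, and A's stripped non-blank lines, as proof-side abbreviations.
def pvJoinNl (L : List (List Char)) : List Char := PySem.Chars.join ['\n'] L

def pvGoodLines (xs : List (List Char)) : List (List Char) :=
  (xs.filter (fun x => !(PySem.Chars.strip x == []))).map PySem.Chars.strip

theorem pvJoinNl_cons (l : List Char) (ls : List (List Char)) :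
    pvJoinNl (l :: ls) = l ++ (if ls = [] then [] else '\n' :: pvJoinNl ls) := by
  cases ls with
  | nil => simp [pvJoinNl, PySem.Chars.join_singleton]
  | cons m ms => simp [pvJoinNl, PySem.Chars.join_cons_cons]

theorem pvJoinNl_ne_nil (l : List Char) (ls : List (List Char)) (h : l ≠ []) :
    pvJoinNl (l :: ls) ≠ [] := by
  rw [pvJoinNl_cons]
  intro hc
  exact h (List.append_eq_nil_iff.mp hc).1

theorem pvJoinNl_append_singleton (L : List (List Char)) (y : List Char)
    (h : ∀ p ∈ L, p ≠ []) :
    pvJoinNl (L ++ [y]) = if pvJoinNl L = [] then y else pvJoinNl L ++ '\n' :: y := by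
  induction L with
  | nil => simp [pvJoinNl, PySem.Chars.join_singleton, PySem.Chars.join_nil]
  | cons l L ih =>
    have hl : l ≠ [] := h l (by simp)
    have hne : pvJoinNl (l :: L) ≠ [] := pvJoinNl_ne_nil l L hl
    rw [if_neg hne]
    rw [List.cons_append, pvJoinNl_cons, pvJoinNl_cons]
    cases L with
    | nil => simp [pvJoinNl, PySem.Chars.join_singleton]
    | cons m M =>
      have hm : m ≠ [] := h m (by simp)
      have hne2 : pvJoinNl (m :: M) ≠ [] := pvJoinNl_ne_nil m M hm
      rw [ih (fun p hp => h p (by simp [hp]))]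
      simp [if_neg hne2, List.append_assoc]

-- the first element a dropWhile keeps fails the predicate
theorem pvHead?_dropWhile (p : Char → Bool) (l : List Char) (a : Char)
    (h : (l.dropWhile p).head? = some a) : p a = false := by
  have hne : l.dropWhile p ≠ [] := by intro h0; rw [h0] at h; simp at h
  have h2 := List.head_dropWhile_not p hne
  rw [List.head?_eq_some_head hne, Option.some.injEq] at h
  rw [← h]; exact h2

theorem pvStrip_last (s : List Char) :
    ∀ c ∈ (PySem.Chars.strip s).getLast?, PySem.Chars.isspace c = false := by
  intro c hc
  simp only [PySem.Chars.strip, PySem.Chars.rstrip, List.getLast?_reverse] at hc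
  exact pvHead?_dropWhile _ _ _ hc

theorem pvStrip_head (s : List Char) :
    ∀ c ∈ (PySem.Chars.strip s).head?, PySem.Chars.isspace c = false := by
  intro c hc
  simp only [PySem.Chars.strip, PySem.Chars.rstrip, List.head?_reverse] at hc
  obtain ⟨pre, hpre⟩ := List.dropWhile_suffix (l := (PySem.Chars.lstrip s).reverse) PySem.Chars.isspace
  have hd : ((PySem.Chars.lstrip s).reverse.dropWhile PySem.Chars.isspace).getLast? = some c := hc
  have hlast : (PySem.Chars.lstrip s).reverse.getLast? = some c := by
    rw [← hpre, List.getLast?_append, hd]; rfl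
  rw [List.getLast?_reverse] at hlast
  exact pvHead?_dropWhile _ _ _ hlast

theorem pvStrip_eq_self (p : List Char)
    (hh : ∀ c ∈ p.head?, PySem.Chars.isspace c = false)
    (hl : ∀ c ∈ p.getLast?, PySem.Chars.isspace c = false) :
    PySem.Chars.strip p = p := by
  have h1 : PySem.Chars.lstrip p = p := by
    cases p with
    | nil => rfl
    | cons a l =>
      have := hh a (by simp)
      simp [PySem.Chars.lstrip, this]
  have h2 : PySem.Chars.rstrip p = p := by
    simp only [PySem.Chars.rstrip]
    cases hr : p.reverse with
    | nil => simp [List.reverse_eq_nil_iff.mp hr]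
    | cons b t =>
      have hb : p.getLast? = some b := by
        rw [← List.head?_reverse, hr]; rfl
      have := hl b hb
      rw [List.dropWhile_cons_of_neg (by simp [this]), ← hr, List.reverse_reverse]
  simp [PySem.Chars.strip, h1, h2]

theorem pvStrip_strip (s : List Char) :
    PySem.Chars.strip (PySem.Chars.strip s) = PySem.Chars.strip s :=
  pvStrip_eq_self _ (pvStrip_head s) (pvStrip_last s)

-- every line in pvGoodLines is a non-empty strip-fixpoint
theorem pvGood_mem (xs : List (List Char)) :
    ∀ p ∈ pvGoodLines xs, PySem.Chars.strip p = p ∧ p ≠ [] := by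
  intro p hp
  simp only [pvGoodLines, List.mem_map, List.mem_filter] at hp
  obtain ⟨x, ⟨_, hx⟩, rfl⟩ := hp
  refine ⟨pvStrip_strip x, ?_⟩
  simpa using hx

-- B's single-pass accumulation computes "\n".join of the two filtered line lists
theorem pv_fold_inv (xs : List (List Char)) (LA LB : List (List Char))
    (hA : ∀ p ∈ LA, p ≠ []) (hB : ∀ p ∈ LB, p ≠ []) :
    xs.foldl pvStepB (pvJoinNl LA, pvJoinNl LB)
    = (pvJoinNl (LA ++ (pvGoodLines xs).filter pvIsLinkC),
       pvJoinNl (LB ++ (pvGoodLines xs).filter (fun x => !pvIsLinkC x))) := by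
  induction xs generalizing LA LB with
  | nil => simp [pvGoodLines]
  | cons x xs ih =>
    simp only [List.foldl_cons]
    by_cases h0 : PySem.Chars.strip x = []
    · have hstep : pvStepB (pvJoinNl LA, pvJoinNl LB) x = (pvJoinNl LA, pvJoinNl LB) := by
        simp [pvStepB, h0]
      have hgood : pvGoodLines (x :: xs) = pvGoodLines xs := by
        simp [pvGoodLines, h0]
      rw [hstep, hgood]; exact ih LA LB hA hB
    · have hgood : pvGoodLines (x :: xs) = PySem.Chars.strip x :: pvGoodLines xs := by
        simp [pvGoodLines, h0]
      by_cases h1 : pvIsLinkC (PySem.Chars.strip x) = true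
      · have hstep : pvStepB (pvJoinNl LA, pvJoinNl LB) x
            = (pvJoinNl (LA ++ [PySem.Chars.strip x]), pvJoinNl LB) := by
          simp only [pvStepB, h0, h1, if_false, if_true]
          rw [pvJoinNl_append_singleton LA _ hA]
        rw [hstep, ih (LA ++ [PySem.Chars.strip x]) LB
            (by intro p hp; rcases List.mem_append.mp hp with h | h
                · exact hA p h
                · simp at h; subst h; exact h0) hB, hgood]
        simp [h1, List.append_assoc]
      · have hstep : pvStepB (pvJoinNl LA, pvJoinNl LB) x
            = (pvJoinNl LA, pvJoinNl (LB ++ [PySem.Chars.strip x])) := by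
          simp only [pvStepB, h0, h1, if_false, Bool.false_eq_true]
          rw [pvJoinNl_append_singleton LB _ hB]
        rw [hstep, ih LA (LB ++ [PySem.Chars.strip x]) hA
            (by intro p hp; rcases List.mem_append.mp hp with h | h
                · exact hB p h
                · simp at h; subst h; exact h0), hgood]
        simp [h1, List.append_assoc]

-- "\n".join of non-empty strip-fixpoints starts with a non-space character …
theorem pvJoinNl_head_ok (L : List (List Char))
    (h : ∀ p ∈ L, PySem.Chars.strip p = p ∧ p ≠ []) :
    ∀ c ∈ (pvJoinNl L).head?, PySem.Chars.isspace c = false := by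
  intro c hc
  cases L with
  | nil => simp [pvJoinNl, PySem.Chars.join_nil] at hc
  | cons l ls =>
    obtain ⟨hsl, hnl⟩ := h l (by simp)
    rw [pvJoinNl_cons, List.head?_append, List.head?_eq_some_head (by exact hnl)] at hc
    simp only [Option.some_or, Option.mem_def, Option.some_inj] at hc
    subst hc
    apply pvStrip_head l
    rw [hsl]
    exact List.head?_eq_some_head hnl

-- … and ends with a non-space character
theorem pvJoinNl_last_ok (L : List (List Char))
    (h : ∀ p ∈ L, PySem.Chars.strip p = p ∧ p ≠ []) :
    ∀ c ∈ (pvJoinNl L).getLast?, PySem.Chars.isspace c = false := by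
  induction L with
  | nil => intro c hc; simp [pvJoinNl, PySem.Chars.join_nil] at hc
  | cons l ls ih =>
    intro c hc
    obtain ⟨hsl, hnl⟩ := h l (by simp)
    cases ls with
    | nil =>
      simp only [pvJoinNl, PySem.Chars.join_singleton] at hc
      apply pvStrip_last l; rw [hsl]; exact hc
    | cons m ms =>
      rw [pvJoinNl_cons, if_neg (by simp)] at hc
      have hne : pvJoinNl (m :: ms) ≠ [] := pvJoinNl_ne_nil m ms (h m (by simp)).2
      have hcons : ('\n' :: pvJoinNl (m :: ms)) = ['\n'] ++ pvJoinNl (m :: ms) := rfl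
      rw [List.getLast?_append, hcons, List.getLast?_append] at hc
      obtain ⟨d, hd⟩ := List.getLast?_isSome.mpr hne |> Option.isSome_iff_exists.mp
      rw [hd] at hc
      simp only [Option.some_or, Option.mem_def, Option.some_inj] at hc
      subst hc
      exact ih (fun p hp => h p (by simp [hp])) d hd

-- so A's final .strip() after the join is a no-op
theorem pv_strip_join (L : List (List Char))
    (h : ∀ p ∈ L, PySem.Chars.strip p = p ∧ p ≠ []) :
    PySem.Chars.strip (pvJoinNl L) = pvJoinNl L :=
  pvStrip_eq_self _ (pvJoinNl_head_ok L h) (pvJoinNl_last_ok L h)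

-- On A's `lines`, `x not in links` is exactly `¬ pvIsLink x`.
theorem pv_comments_eq (lines : List String) :
    lines.filter (fun x => !((lines.filter pvIsLink).contains x)) = lines.filter (fun x => !pvIsLink x) := by
  apply List.filter_congr
  intro x hx
  by_cases h : pvIsLink x = true
  · simp [List.mem_filter, hx, h]
  · simp [List.mem_filter, h]

theorem pvIsLink_toList (x : String) : pvIsLink x = pvIsLinkC x.toList := by
  simp [pvIsLink, pvIsLinkC, PySem.Str.startswith_eq]

theorem pv_pred_toList (x : String) :
    (PySem.Str.strip x != "") = !(PySem.Chars.strip x.toList == []) := by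
  have key : (PySem.Str.strip x = "") ↔ (PySem.Chars.strip x.toList = []) := by
    rw [← PySem.Str.toList_strip, String.toList_eq_nil_iff]
  by_cases h : PySem.Chars.strip x.toList = []
  · simp [key.mpr h, h]
  · have h2 : PySem.Str.strip x ≠ "" := fun h0 => h (key.mp h0)
    have e1 : (PySem.Str.strip x != "") = true := by simp [bne_iff_ne, h2]
    have e2 : (!(PySem.Chars.strip x.toList == [])) = true := by simp [h]
    rw [e1, e2]

-- A's stripped non-blank lines, seen as char lists, are pvGoodLines of the char-level splitlines
theorem pv_lines_toList (txt : String) :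
    (((PySem.Str.splitlines txt).filter (fun x => PySem.Str.strip x != "")).map PySem.Str.strip).map String.toList
    = pvGoodLines (PySem.Chars.splitlines txt.toList) := by
  rw [← PySem.Str.splitlines_map_toList]
  unfold pvGoodLines
  rw [List.filter_map, List.map_map, List.map_map]
  congr 1
  · funext x
    simp [PySem.Str.toList_strip]
  · apply List.filter_congr
    intro x _
    rw [pv_pred_toList]
    rfl

-- the character content of one of A's joined-and-stripped halves
theorem pv_chain (txt : String) (pS : String → Bool) (pC : List Char → Bool)
    (hp : ∀ x, pS x = pC x.toList) :
    (PySem.Str.strip (PySem.Str.join "\n"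
      (((((PySem.Str.splitlines txt).filter (fun x => PySem.Str.strip x != "")).map PySem.Str.strip)).filter pS))).toList
    = pvJoinNl ((pvGoodLines (PySem.Chars.splitlines txt.toList)).filter pC) := by
  rw [PySem.Str.toList_strip, PySem.Str.toList_join]
  have hfil : ∀ (l : List String), (l.filter pS).map String.toList = (l.map String.toList).filter pC := by
    intro l
    rw [List.filter_map]
    congr 1
    apply List.filter_congr
    intro x _
    rw [hp, Function.comp_apply]
  rw [hfil, pv_lines_toList]
  have hsep : ("\n" : String).toList = ['\n'] := rfl
  rw [hsep]
  exact pv_strip_join _ (fun p hp2 => pvGood_mem _ p (List.mem_of_mem_filter hp2))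

-- lifting char-list equality back to A's `or None` results
theorem pv_opt (s : String) (cs : List Char) (h : s.toList = cs) :
    (if s = "" then none else some s) = (if cs = [] then none else some (String.ofList cs)) := by
  by_cases hz : cs = []
  · have : s = "" := String.toList_eq_nil_iff.mp (by rw [h, hz])
    simp [this, hz]
  · have hs : s ≠ "" := fun h0 => hz (by rw [← h, h0]; rfl)
    rw [if_neg hs, if_neg hz, ← h, String.ofList_toList]

-- ===== VERDICT (by name: the statement is the Claim_ definition above) =====
set_option maxHeartbeats 1000000 in
theorem split_link_comment_py_spec : Claim_equal_split_link_comment_py := by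
  intro raw _
  unfold Spec_split_link_comment_py split_link_comment_py split_link_comment_py_alt
  by_cases h : PySem.Str.strip (raw.getD "") = ""
  · simp [h]
  · simp only [h, if_false]
    rw [pv_comments_eq]
    have hinit : (([], []) : List Char × List Char) = (pvJoinNl [], pvJoinNl []) := by
      simp [pvJoinNl, PySem.Chars.join_nil]
    have hfold : List.foldl pvStepB ([], []) (PySem.Chars.splitlines (PySem.Str.strip (raw.getD "")).toList)
        = (pvJoinNl ((pvGoodLines (PySem.Chars.splitlines (PySem.Str.strip (raw.getD "")).toList)).filter pvIsLinkC),
           pvJoinNl ((pvGoodLines (PySem.Chars.splitlines (PySem.Str.strip (raw.getD "")).toList)).filter (fun x => !pvIsLinkC x))) := by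
      rw [hinit, pv_fold_inv _ [] [] (by simp) (by simp), List.nil_append, List.nil_append]
    have hc1 := pv_chain (PySem.Str.strip (raw.getD "")) pvIsLink pvIsLinkC pvIsLink_toList
    have hc2 := pv_chain (PySem.Str.strip (raw.getD "")) (fun x => !pvIsLink x)
      (fun x => !pvIsLinkC x) (fun x => by simp [pvIsLink_toList])
    have e1 := pv_opt _ _ hc1
    have e2 := pv_opt _ _ hc2
    simp only [hfold, Prod.mk.injEq]
    exact ⟨e1, e2⟩
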